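-- pv_equiv track=rewrite | github.com/hunter-classes/fall-2022-127-work-mattlabarca10 | listlab.py | sumTillEven
-- ===== SOURCE A (Python) =====
-- def sumTillEven(numList):
--     sum = 0
--     for num in numList:
--         if(num%2==0):
--             return sum
--         else:
--             sum+=num
--     return sum
-- ===== SOURCE B (Python) =====
-- def sumTillEven(numList):
--     idx = next((i for i, x in enumerate(numList) if x % 2 == 0), len(numList))
--     return sum(numList[:idx])
-- ===== Notes on version B (the rewrite author's own statement) =====
-- stated objective: idiomatic
-- what changed: Replaces A's fused test-and-accumulate loop with a locate phase (index of first even via enumerate/next) followed by a separate sum over the prefix slice.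
import Mathlib
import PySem

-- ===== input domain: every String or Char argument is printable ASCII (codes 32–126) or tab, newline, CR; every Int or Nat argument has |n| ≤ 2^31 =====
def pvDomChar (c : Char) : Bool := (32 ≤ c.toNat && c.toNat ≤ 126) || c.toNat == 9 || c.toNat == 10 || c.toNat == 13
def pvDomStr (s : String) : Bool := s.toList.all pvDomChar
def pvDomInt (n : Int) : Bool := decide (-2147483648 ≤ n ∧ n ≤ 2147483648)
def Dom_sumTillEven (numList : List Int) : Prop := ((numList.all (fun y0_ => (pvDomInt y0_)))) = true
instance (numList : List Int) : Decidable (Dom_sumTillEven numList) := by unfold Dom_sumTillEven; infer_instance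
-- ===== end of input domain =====

-- B separates locating the first even element from summing the preceding prefix (idiomatic decomposition, same cost).

-- ===== PORT A =====
-- A's fused loop: accumulate odd elements, return the accumulator on the first even.
def sumTillEvenGo (sum : Int) : List Int → Int
  | [] => sum
  | num :: rest => if num % 2 == 0 then sum else sumTillEvenGo (sum + num) rest

def sumTillEven (numList : List Int) : Int := sumTillEvenGo 0 numList

-- ===== PORT B =====
-- index of the first even element (length if none), as in Source B's next(enumerate…)
def firstEvenIdx : List Int → Nat
  | [] => 0
  | x :: rest => if x % 2 == 0 then 0 else 1 + firstEvenIdx rest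

def sumTillEven_alt (numList : List Int) : Int :=
  ((numList.take (firstEvenIdx numList)).foldl (· + ·) 0)

-- ===== PRECONDITION & SPEC =====
def Spec_sumTillEven (numList : List Int) (out : Int) : Prop := out = sumTillEven_alt numList
instance (numList : List Int) (out : Int) : Decidable (Spec_sumTillEven numList out) := by unfold Spec_sumTillEven; infer_instance

-- ===== CLAIM (what is proved, stated in full; the proofs are below) =====
def Claim_equal_sumTillEven : Prop := ∀ (numList : List Int), Dom_sumTillEven numList → Spec_sumTillEven numList (sumTillEven numList)

-- ===== LEMMAS AND PROOFS =====
theorem sumTillEvenGo_eq (l : List Int) : ∀ (s : Int),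
    sumTillEvenGo s l = (l.take (firstEvenIdx l)).foldl (· + ·) s := by
  induction l with
  | nil => intro s; rfl
  | cons x rest ih =>
      intro s
      by_cases h : x % 2 == 0
      · simp [sumTillEvenGo, firstEvenIdx, h]
      · simp only [sumTillEvenGo, firstEvenIdx, h, if_neg, Bool.false_eq_true, if_false,
          Nat.add_comm 1, List.take_succ_cons, List.foldl_cons]
        exact ih (s + x)

-- ===== VERDICT (by name: the statement is the Claim_ definition above) =====
theorem sumTillEven_spec : Claim_equal_sumTillEven := by
  intro l _
  show sumTillEven l = sumTillEven_alt l
  rw [sumTillEven, sumTillEvenGo_eq, sumTillEven_alt]
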